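-- pv_equiv track=rewrite | github.com/CacheJoe/timetable | TIMETABLE/timetable/scheduling/scoring.py | gap_count
-- ===== SOURCE A (Python) =====
-- def _segments() -> tuple[tuple[int, ...], ...]:
--     return ((0, 1, 2, 3), (4, 5, 6))
--
-- def gap_count(occupied_slots: set[int]) -> int:
--     gaps = 0
--     for segment in _segments():
--         active = [slot for slot in segment if slot in occupied_slots]
--         if len(active) < 2:
--             continue
--         for slot in range(min(active), max(active) + 1):
--             if slot not in occupied_slots and slot in segment:
--                 gaps += 1
--     return gaps
-- ===== SOURCE B (Python) =====
-- def _segments() -> tuple[tuple[int, ...], ...]: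
--     return ((0, 1, 2, 3), (4, 5, 6))
--
-- def gap_count(occupied_slots: set[int]) -> int:
--     # Each segment is a contiguous range, so the interior gaps of a segment
--     # are exactly (max(active) - min(active) + 1) - len(active): no inner scan.
--     gaps = 0
--     for segment in _segments():
--         active = [slot for slot in segment if slot in occupied_slots]
--         if len(active) >= 2:
--             gaps += (max(active) - min(active) + 1) - len(active)
--     return gaps
-- ===== Notes on version B (the rewrite author's own statement) =====
-- stated objective: simpler
-- what changed: Replaces A's inner scan over range(min,max+1) with the closed-form count (max(active)-min(active)+1)-len(active), valid because each segment is a contiguous range.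
import Mathlib
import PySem

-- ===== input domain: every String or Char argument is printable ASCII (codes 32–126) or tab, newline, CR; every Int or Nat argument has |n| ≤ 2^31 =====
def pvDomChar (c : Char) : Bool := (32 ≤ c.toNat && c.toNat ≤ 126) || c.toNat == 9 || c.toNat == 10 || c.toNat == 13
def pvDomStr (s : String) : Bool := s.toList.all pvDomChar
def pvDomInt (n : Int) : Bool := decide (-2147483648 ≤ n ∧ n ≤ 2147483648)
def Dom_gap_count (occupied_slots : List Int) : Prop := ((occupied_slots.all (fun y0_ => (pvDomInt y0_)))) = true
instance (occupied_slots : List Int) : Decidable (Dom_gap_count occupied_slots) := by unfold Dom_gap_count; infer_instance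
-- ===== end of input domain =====

-- B replaces A's inner scan of range(min,max+1) with the closed form
-- (max(active)-min(active)+1)-len(active); simpler, same result.

-- ===== PORT A =====
-- _segments() : the fixed segments, as a list of lists
def pvSegments : List (List Int) := [[0, 1, 2, 3], [4, 5, 6]]

def gap_count (occupied_slots : List Int) : Int :=
  pvSegments.foldl
    (fun gaps segment =>
      let active := segment.filter (fun slot => PySem.Set.contains occupied_slots slot)
      if active.length < 2 then gaps
      else
        -- min/max are guarded by len(active) >= 2, so the defaults are never used
        (PySem.List.pyRange ((PySem.List.min? active (fun x => x)).getD 0)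
            (((PySem.List.max? active (fun x => x)).getD 0) + 1) 1).foldl
          (fun gaps slot =>
            if ¬ PySem.Set.contains occupied_slots slot ∧ slot ∈ segment then gaps + 1
            else gaps)
          gaps)
    0

-- ===== PORT B =====
def gap_count_alt (occupied_slots : List Int) : Int :=
  pvSegments.foldl
    (fun gaps segment =>
      let active := segment.filter (fun slot => PySem.Set.contains occupied_slots slot)
      if active.length ≥ 2 then
        gaps + (((PySem.List.max? active (fun x => x)).getD 0)
                 - ((PySem.List.min? active (fun x => x)).getD 0) + 1)
             - (active.length : Int)
      else gaps)
    0

-- ===== PRECONDITION & SPEC =====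
def Spec_gap_count (occupied_slots : List Int) (out : Int) : Prop := out = gap_count_alt occupied_slots
instance (occupied_slots : List Int) (out : Int) : Decidable (Spec_gap_count occupied_slots out) := by unfold Spec_gap_count; infer_instance

-- ===== CLAIM (what is proved, stated in full; the proofs are below) =====
def Claim_equal_gap_count : Prop := ∀ (occupied_slots : List Int), Dom_gap_count occupied_slots → Spec_gap_count occupied_slots (gap_count occupied_slots)

-- ===== LEMMAS AND PROOFS =====

-- ===== VERDICT (by name: the statement is the Claim_ definition above) =====
set_option maxHeartbeats 4000000 in
theorem gap_count_spec : Claim_equal_gap_count := by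
  intro occ _
  unfold Spec_gap_count gap_count gap_count_alt pvSegments
  by_cases h0 : (0 : Int) ∈ occ <;>
  by_cases h1 : (1 : Int) ∈ occ <;>
  by_cases h2 : (2 : Int) ∈ occ <;>
  by_cases h3 : (3 : Int) ∈ occ <;>
  by_cases h4 : (4 : Int) ∈ occ <;>
  by_cases h5 : (5 : Int) ∈ occ <;>
  by_cases h6 : (6 : Int) ∈ occ <;>
    simp [h0, h1, h2, h3, h4, h5, h6, PySem.List.min?, PySem.List.max?,
      PySem.List.pyRange, List.foldl, List.filter, List.range_succ, List.range_zero,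
      List.map_append, List.map]
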